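-- pv_equiv track=rewrite | github.com/sergiorgiraldo/Python-lang | data-engineering-interview-patterns/patterns/07_intervals/problems/p435_non_overlapping.py | erase_overlap_intervals_start
-- ===== SOURCE A (Python) =====
-- def erase_overlap_intervals_start(intervals: list[list[int]]) -> int:
--     """
--     Alternative: sort by start time, greedily remove the one
--     with the later end when two overlap.
--
--     Time: O(n log n)  Space: O(1)
--     """
--     if not intervals:
--         return 0
--
--     intervals.sort(key=lambda x: x[0])
--     removals = 0
--     last_end = intervals[0][1]
--
--     for start, end in intervals[1:]:
--         if start < last_end:  # overlap
--             removals += 1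
--             last_end = min(last_end, end)  # keep the shorter one
--         else:
--             last_end = end
--
--     return removals
-- ===== SOURCE B (Python) =====
-- def erase_overlap_intervals_start(intervals: list[list[int]]) -> int:
--     """Dynamic programming instead of the greedy scan: after the same in-place
--     start-sort, compute for every interval the length of the longest 'compatible
--     chain' (each start >= previous end) ending there, and return n minus the
--     longest chain overall (the kept intervals form exactly such a chain)."""
--     intervals.sort(key=lambda x: x[0])
--     chains = []  # (end_j, length of longest compatible chain ending at j)
--     for s, e in intervals:
--         best = 0
--         for e2, d in chains:
--             if s >= e2 and d > best:
--                 best = d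
--         chains.append((e, best + 1))
--     longest = 0
--     for _, d in chains:
--         if d > longest:
--             longest = d
--     return len(intervals) - longest
-- ===== Notes on version B (the rewrite author's own statement) =====
-- stated objective: alternative
-- what changed: B replaces A's single greedy scan (removal counter plus running minimum end) by an O(n^2) longest-compatible-chain dynamic program over the start-sorted list, returning n minus the longest chain; the greedy bookkeeping disappears entirely.
-- outside the precondition, e.g. on erase_overlap_intervals_start([[1, 2, 3]]): A returns 0, B raises ValueError
import Mathlib
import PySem

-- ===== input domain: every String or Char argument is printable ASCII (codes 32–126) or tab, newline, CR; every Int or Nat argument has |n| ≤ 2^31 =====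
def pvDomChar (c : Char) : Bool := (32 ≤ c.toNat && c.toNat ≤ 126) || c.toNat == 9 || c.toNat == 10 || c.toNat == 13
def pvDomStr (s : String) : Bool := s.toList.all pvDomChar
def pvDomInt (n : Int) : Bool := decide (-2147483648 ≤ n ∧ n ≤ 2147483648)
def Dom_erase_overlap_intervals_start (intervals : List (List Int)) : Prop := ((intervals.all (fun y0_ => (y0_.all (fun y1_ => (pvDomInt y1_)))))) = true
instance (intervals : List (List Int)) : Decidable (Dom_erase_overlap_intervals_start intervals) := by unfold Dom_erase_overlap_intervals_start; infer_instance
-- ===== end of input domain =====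

-- B replaces A's greedy scan by a longest-compatible-chain dynamic program over the
-- same start-sorted list and returns n - longest chain: a different algorithm, not
-- faster (O(n^2) vs O(n log n)). Both Pythons sort the argument in place by start
-- (same mutation); the equivalence proved is about the return value.

-- ===== PORT A =====
def erase_overlap_intervals_start (intervals : List (List Int)) : Int :=
  if intervals = [] then 0
  else
    let srt := PySem.List.sorted intervals (fun x => PySem.List.pyGetD x 0 0) false
    -- last_end = intervals[0][1]
    let init : Int × Int := (0, PySem.List.pyGetD (PySem.List.pyGetD srt 0 []) 1 0)
    -- for start, end in intervals[1:]  (state = (removals, last_end))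
    let fin := (PySem.List.slice srt (some 1) none).foldl
      (fun (st : Int × Int) iv =>
        if PySem.List.pyGetD iv 0 0 < st.2 then (st.1 + 1, min st.2 (PySem.List.pyGetD iv 1 0))
        else (st.1, PySem.List.pyGetD iv 1 0)) init
    fin.1

-- ===== PORT B =====
-- Source B's inner loop: best = max d over earlier chain entries (e2, d) with s >= e2
def eosBest (s : Int) (chains : List (Int × Int)) : Int :=
  chains.foldl (fun best p => if s ≥ p.1 ∧ p.2 > best then p.2 else best) 0

def erase_overlap_intervals_start_alt (intervals : List (List Int)) : Int :=
  let srt := PySem.List.sorted intervals (fun x => PySem.List.pyGetD x 0 0) false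
  -- chains.append((e, best + 1)) for each (s, e) in the sorted list
  let chains := srt.foldl
    (fun (C : List (Int × Int)) iv =>
      C ++ [(PySem.List.pyGetD iv 1 0, eosBest (PySem.List.pyGetD iv 0 0) C + 1)]) []
  -- longest = max d over chains (0 if empty)
  let longest := chains.foldl (fun a p => if p.2 > a then p.2 else a) 0
  (srt.length : Int) - longest

-- ===== PRECONDITION & SPEC =====
-- Pre_ restricts to well-formed [start, end] pairs, the natural domain: on ragged
-- inputs A raises (IndexError from the sort key or the first element's x[1],
-- ValueError unpacking an inner list of length != 2) except when a single over-long
-- interval accidentally lands first after sorting (A then ignores the extra entries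
-- and returns, while B's uniform unpacking raises ValueError).
def Pre_erase_overlap_intervals_start (intervals : List (List Int)) : Prop :=
  ∀ l ∈ intervals, l.length = 2
instance (intervals : List (List Int)) : Decidable (Pre_erase_overlap_intervals_start intervals) := by
  unfold Pre_erase_overlap_intervals_start; infer_instance
def pvWitness_erase_overlap_intervals_start : List (List Int) := [[1, 3], [2, 4], [5, 6]]
def Spec_erase_overlap_intervals_start (intervals : List (List Int)) (out : Int) : Prop := out = erase_overlap_intervals_start_alt intervals
instance (intervals : List (List Int)) (out : Int) : Decidable (Spec_erase_overlap_intervals_start intervals out) := by unfold Spec_erase_overlap_intervals_start; infer_instance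

-- ===== CLAIM =====
def Claim_equal_erase_overlap_intervals_start : Prop := ∀ (intervals : List (List Int)), Dom_erase_overlap_intervals_start intervals → Pre_erase_overlap_intervals_start intervals → Spec_erase_overlap_intervals_start intervals (erase_overlap_intervals_start intervals)

-- ===== LEMMAS AND PROOFS =====

def sfst (iv : List Int) : Int := PySem.List.pyGetD iv 0 0
def ssnd (iv : List Int) : Int := PySem.List.pyGetD iv 1 0

-- A's loop body
def stepA (st : Int × Int) (iv : List Int) : Int × Int :=
  if sfst iv < st.2 then (st.1 + 1, min st.2 (ssnd iv)) else (st.1, ssnd iv)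

-- B's outer loop body
def stepB (C : List (Int × Int)) (iv : List Int) : List (Int × Int) :=
  C ++ [(ssnd iv, eosBest (sfst iv) C + 1)]

def maxd (C : List (Int × Int)) : Int :=
  C.foldl (fun a p => if p.2 > a then p.2 else a) 0

-- invariant relating B's chain table to A's greedy state after a common prefix:
-- k = kept count, b = min end of the current run, m = start of the current run's starter
def eosInv (C : List (Int × Int)) (k b m : Int) : Prop :=
  1 ≤ k ∧
  (∀ p ∈ C, p.2 ≤ k) ∧
  (∃ p ∈ C, p.2 = k ∧ p.1 ≤ b) ∧
  (∀ p ∈ C, p.2 = k → b ≤ p.1) ∧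
  (k = 1 ∨ ∃ p ∈ C, p.2 = k - 1 ∧ p.1 ≤ m)

lemma bestAux_ge_acc (s : Int) (C : List (Int × Int)) : ∀ a : Int,
    a ≤ C.foldl (fun best p => if s ≥ p.1 ∧ p.2 > best then p.2 else best) a := by
  induction C with
  | nil => intro a; simp
  | cons p C ih =>
      intro a
      simp only [List.foldl_cons]
      split_ifs with h
      · exact le_trans (le_of_lt h.2) (ih p.2)
      · exact ih a

lemma bestAux_ge_mem (s : Int) (C : List (Int × Int)) : ∀ (a : Int) (p : Int × Int),
    p ∈ C → p.1 ≤ s →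
    p.2 ≤ C.foldl (fun best q => if s ≥ q.1 ∧ q.2 > best then q.2 else best) a := by
  induction C with
  | nil => intro a p hp; simp at hp
  | cons q C ih =>
      intro a p hp hps
      simp only [List.foldl_cons]
      rcases List.mem_cons.mp hp with h | h
      · subst h
        by_cases hgt : p.2 > a
        · rw [if_pos ⟨hps, hgt⟩]; exact bestAux_ge_acc s C p.2
        · rw [if_neg (by tauto)]
          exact le_trans (by omega) (bestAux_ge_acc s C a)
      · split_ifs <;> exact ih _ p h hps

lemma bestAux_le (s v : Int) (C : List (Int × Int)) :
    ∀ a : Int, a ≤ v → (∀ p ∈ C, p.1 ≤ s → p.2 ≤ v) →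
    C.foldl (fun best p => if s ≥ p.1 ∧ p.2 > best then p.2 else best) a ≤ v := by
  induction C with
  | nil => intro a ha _; simpa using ha
  | cons p C ih =>
      intro a ha hall
      simp only [List.foldl_cons]
      split_ifs with h
      · exact ih _ (hall p (by simp) h.1) (fun q hq => hall q (by simp [hq]))
      · exact ih _ ha (fun q hq => hall q (by simp [hq]))

lemma maxdAux_le (v : Int) (C : List (Int × Int)) :
    ∀ a : Int, a ≤ v → (∀ p ∈ C, p.2 ≤ v) →
    C.foldl (fun a p => if p.2 > a then p.2 else a) a ≤ v := by
  induction C with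
  | nil => intro a ha _; simpa using ha
  | cons p C ih =>
      intro a ha hall
      simp only [List.foldl_cons]
      split_ifs with h
      · exact ih _ (hall p (by simp)) (fun q hq => hall q (by simp [hq]))
      · exact ih _ ha (fun q hq => hall q (by simp [hq]))

lemma maxdAux_ge_acc (C : List (Int × Int)) : ∀ a : Int,
    a ≤ C.foldl (fun a p => if p.2 > a then p.2 else a) a := by
  induction C with
  | nil => intro a; simp
  | cons p C ih =>
      intro a
      simp only [List.foldl_cons]
      split_ifs with h
      · exact le_trans (le_of_lt h) (ih p.2)
      · exact ih a

lemma maxdAux_ge_mem (C : List (Int × Int)) : ∀ (a : Int) (p : Int × Int), p ∈ C →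
    p.2 ≤ C.foldl (fun a p => if p.2 > a then p.2 else a) a := by
  induction C with
  | nil => intro a p hp; simp at hp
  | cons q C ih =>
      intro a p hp
      simp only [List.foldl_cons]
      rcases List.mem_cons.mp hp with h | h
      · subst h
        by_cases hgt : p.2 > a
        · rw [if_pos hgt]; exact maxdAux_ge_acc C p.2
        · rw [if_neg hgt]
          exact le_trans (by omega) (maxdAux_ge_acc C a)
      · split_ifs <;> exact ih _ p h

lemma maxd_eq (C : List (Int × Int)) (k : Int) (hk : 0 ≤ k)
    (hle : ∀ p ∈ C, p.2 ≤ k) (hex : ∃ p ∈ C, p.2 = k) : maxd C = k := by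
  obtain ⟨p, hp, hpk⟩ := hex
  exact le_antisymm (maxdAux_le k C 0 hk hle) (hpk ▸ maxdAux_ge_mem C 0 p hp)

-- main invariant lemma: folding the remaining (start-sorted) suffix preserves eosInv,
-- and B's chain count plus A's removal count accounts for every interval
lemma eos_main (T : List (List Int)) : ∀ (C : List (Int × Int)) (k b m r : Int),
    eosInv C k b m →
    List.Pairwise (fun x y => sfst x ≤ sfst y) T →
    (∀ iv ∈ T, m ≤ sfst iv) →
    ∃ k' b' m', eosInv (T.foldl stepB C) k' b' m' ∧
      k' + (T.foldl stepA (r, b)).1 = k + r + T.length := by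
  induction T with
  | nil =>
      intro C k b m r hInv _ _
      exact ⟨k, b, m, hInv, by simp⟩
  | cons iv T ih =>
      intro C k b m r hInv hpw hm
      obtain ⟨hk1, hle, ⟨w, hwC, hwk, hwb⟩, hrun, hprev⟩ := hInv
      have hms : m ≤ sfst iv := hm iv (by simp)
      have hpwT : List.Pairwise (fun x y => sfst x ≤ sfst y) T := (List.pairwise_cons.mp hpw).2
      have hhd : ∀ y ∈ T, sfst iv ≤ sfst y := (List.pairwise_cons.mp hpw).1
      simp only [List.foldl_cons]
      by_cases h : sfst iv < b
      · -- same run: A removes, B's new chain entry has length exactly k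
        have hbest : eosBest (sfst iv) C = k - 1 := by
          have hub : eosBest (sfst iv) C ≤ k - 1 := by
            refine bestAux_le _ _ _ 0 (by omega) ?_
            intro p hp hps
            have h1 := hle p hp
            by_cases hpk : p.2 = k
            · exact absurd (lt_of_le_of_lt (le_trans (hrun p hp hpk) hps) h) (lt_irrefl _)
            · omega
          have hlb : k - 1 ≤ eosBest (sfst iv) C := by
            rcases hprev with h1 | ⟨q, hqC, hqk, hqm⟩
            · subst h1; simpa [eosBest] using bestAux_ge_acc (sfst iv) C 0
            · exact hqk ▸ bestAux_ge_mem (sfst iv) C 0 q hqC (le_trans hqm hms)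
          omega
        have hInv' : eosInv (stepB C iv) k (min b (ssnd iv)) m := by
          refine ⟨hk1, ?_, ?_, ?_, ?_⟩
          · intro p hp
            rcases List.mem_append.mp hp with hp | hp
            · exact hle p hp
            · simp at hp; subst hp; simp [hbest]
          · by_cases he : ssnd iv ≤ b
            · exact ⟨(ssnd iv, eosBest (sfst iv) C + 1), by simp [stepB], by simp [hbest], by simp [he]⟩
            · exact ⟨w, by simp [stepB, hwC], hwk, by omega⟩
          · intro p hp hpk
            rcases List.mem_append.mp hp with hp | hp
            · exact le_trans (min_le_left _ _) (hrun p hp hpk)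
            · simp at hp; subst hp; simp
          · rcases hprev with h1 | ⟨q, hqC, hqk, hqm⟩
            · exact Or.inl h1
            · exact Or.inr ⟨q, by simp [stepB, hqC], hqk, hqm⟩
        have hstA : stepA (r, b) iv = (r + 1, min b (ssnd iv)) := by
          simp [stepA, h]
        rw [hstA]
        obtain ⟨k', b', m', hI, heq⟩ := ih (stepB C iv) k (min b (ssnd iv)) m (r + 1) hInv' hpwT
          (fun y hy => hm y (by simp [hy]))
        refine ⟨k', b', m', by simpa [stepB] using hI, ?_⟩
        simp only [List.length_cons] at *
        push_cast at heq ⊢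
        omega
      · -- new run: A keeps, B's new chain entry has length k + 1
        have hbest : eosBest (sfst iv) C = k := by
          have hub : eosBest (sfst iv) C ≤ k := by
            refine bestAux_le _ _ _ 0 (by omega) ?_
            intro p hp _; exact hle p hp
          have hlb : k ≤ eosBest (sfst iv) C := by
            exact hwk ▸ bestAux_ge_mem (sfst iv) C 0 w hwC (by omega)
          omega
        have hInv' : eosInv (stepB C iv) (k + 1) (ssnd iv) (sfst iv) := by
          refine ⟨by omega, ?_, ?_, ?_, ?_⟩
          · intro p hp
            rcases List.mem_append.mp hp with hp | hp
            · have := hle p hp; omega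
            · simp at hp; subst hp; simp [hbest]
          · exact ⟨(ssnd iv, eosBest (sfst iv) C + 1), by simp [stepB], by simp [hbest], by simp⟩
          · intro p hp hpk
            rcases List.mem_append.mp hp with hp | hp
            · have := hle p hp; omega
            · simp at hp; subst hp; simp
          · exact Or.inr ⟨w, by simp [stepB, hwC], by omega, by omega⟩
        have hstA : stepA (r, b) iv = (r, ssnd iv) := by
          simp [stepA, h]
        rw [hstA]
        obtain ⟨k', b', m', hI, heq⟩ := ih (stepB C iv) (k + 1) (ssnd iv) (sfst iv) r hInv' hpwT hhd
        refine ⟨k', b', m', by simpa [stepB] using hI, ?_⟩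
        simp only [List.length_cons] at *
        push_cast at heq ⊢
        omega

-- ===== VERDICT =====
theorem erase_overlap_intervals_start_spec : Claim_equal_erase_overlap_intervals_start := by
  intro intervals _ _
  unfold Spec_erase_overlap_intervals_start erase_overlap_intervals_start erase_overlap_intervals_start_alt
  by_cases hnil : intervals = []
  · subst hnil; simp [PySem.List.sorted]
  · simp only [hnil, if_neg, not_false_iff]
    have hlen : (PySem.List.sorted intervals (fun x => PySem.List.pyGetD x 0 0) false).length
        = intervals.length := PySem.List.length_sorted ..
    obtain ⟨iv, t, hsrt⟩ :
        ∃ iv t, PySem.List.sorted intervals (fun x => PySem.List.pyGetD x 0 0) false = iv :: t := by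
      cases h : PySem.List.sorted intervals (fun x => PySem.List.pyGetD x 0 0) false with
      | nil =>
          exfalso
          rw [h] at hlen
          exact hnil (List.eq_nil_of_length_eq_zero hlen.symm)
      | cons a b => exact ⟨a, b, rfl⟩
    have hpw : List.Pairwise (fun x y => sfst x ≤ sfst y)
        (PySem.List.sorted intervals (fun x => PySem.List.pyGetD x 0 0) false) :=
      PySem.List.sorted_pairwise ..
    rw [hsrt] at hpw
    have hstepA : (fun (st : Int × Int) iv =>
        if PySem.List.pyGetD iv 0 0 < st.2 then (st.1 + 1, min st.2 (PySem.List.pyGetD iv 1 0))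
        else (st.1, PySem.List.pyGetD iv 1 0)) = stepA := by
      funext st iv; simp [stepA, sfst, ssnd]
    have hstepB : (fun (C : List (Int × Int)) iv =>
        C ++ [(PySem.List.pyGetD iv 1 0, eosBest (PySem.List.pyGetD iv 0 0) C + 1)]) = stepB := by
      funext C iv; simp [stepB, sfst, ssnd]
    have hinit : PySem.List.pyGetD (iv :: t) 0 [] = iv := by
      simp [PySem.List.pyGetD, PySem.List.pyGet?, PySem.List.pyIdx?]
    have hfirst : stepB [] iv = [(ssnd iv, 1)] := by
      simp [stepB, eosBest]
    have hInv0 : eosInv [(ssnd iv, 1)] 1 (ssnd iv) (sfst iv) := by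
      refine ⟨le_refl 1, ?_, ⟨(ssnd iv, 1), by simp, by simp, by simp⟩, ?_, Or.inl rfl⟩
      · intro p hp; simp at hp; subst hp; simp
      · intro p hp _; simp at hp; subst hp; simp
    obtain ⟨k', b', m', hI, heq⟩ := eos_main t [(ssnd iv, 1)] 1 (ssnd iv) (sfst iv) 0 hInv0
      (List.pairwise_cons.mp hpw).2 (List.pairwise_cons.mp hpw).1
    obtain ⟨hk1, hle, ⟨w, hw, hwk, _⟩, _, _⟩ := hI
    have hmaxd : maxd (t.foldl stepB [(ssnd iv, 1)]) = k' :=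
      maxd_eq _ k' (by omega) hle ⟨w, hw, hwk⟩
    rw [hsrt, PySem.List.slice_from_one]
    simp only [List.tail_cons, hstepA, hstepB, hinit, List.foldl_cons, hfirst, List.length_cons]
    unfold maxd at hmaxd
    simp only [ssnd] at hmaxd heq ⊢
    rw [hmaxd]
    push_cast
    omega
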